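-- pv_equiv track=rewrite | github.com/rafael-prazeres/coursera-python-programming-part-1 | semana_7/soma_hipotenusas.py | e_hipotenusa_primeira_tentativa
-- ===== SOURCE A (Python) =====
-- def e_hipotenusa_primeira_tentativa(a):
--     resposta = False
--     b = a - 1
--     c = 1
--     while b >= 1:
--         while c <= a - 1:
--             if a**2 == b**2 + c**2:
--                 resposta = True
--                 break
--             c = c + 1
--         if resposta:
--             break
--         b = b - 1
--         c = 1
--     return resposta
-- ===== SOURCE B (Python) =====
-- from math import isqrt
--
-- def e_hipotenusa_primeira_tentativa(a):
--     for b in range(1, a):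
--         d = a * a - b * b
--         r = isqrt(d)
--         if r * r == d:
--             return True
--     return False
-- ===== Notes on version B (the rewrite author's own statement) =====
-- stated objective: faster
-- what changed: Replaces the O(a^2) nested scan over all leg pairs (b,c) by a single O(a) loop over b that tests whether a^2-b^2 is a perfect square via integer square root.
import Mathlib
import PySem

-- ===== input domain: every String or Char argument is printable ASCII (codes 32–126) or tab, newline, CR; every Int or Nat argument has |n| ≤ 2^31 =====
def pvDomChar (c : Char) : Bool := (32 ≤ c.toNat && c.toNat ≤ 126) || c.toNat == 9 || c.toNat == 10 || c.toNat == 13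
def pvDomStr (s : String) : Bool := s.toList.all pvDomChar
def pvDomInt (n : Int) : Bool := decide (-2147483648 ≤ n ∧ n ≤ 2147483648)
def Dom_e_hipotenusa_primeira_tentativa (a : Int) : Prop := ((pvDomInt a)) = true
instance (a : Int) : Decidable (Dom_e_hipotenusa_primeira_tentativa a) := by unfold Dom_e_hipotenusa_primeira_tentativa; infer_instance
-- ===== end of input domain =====

-- B replaces A's O(a^2) nested scan over leg pairs (b,c) by a single loop over b
-- testing whether a^2 - b^2 is a perfect square via integer square root (objective: faster).

-- ===== PORT A =====
-- inner 'while c <= a - 1' loop of A (b fixed, flag/break folded into the Bool result)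
def pvInnerA (a b c : Int) : Bool :=
  if c ≤ a - 1 then
    if a ^ 2 = b ^ 2 + c ^ 2 then true
    else pvInnerA a b (c + 1)
  else false
termination_by (a - c).toNat
decreasing_by omega

-- outer 'while b >= 1' loop of A; c is reset to 1 before each inner scan
def pvOuterA (a b : Int) : Bool :=
  if b ≥ 1 then
    if pvInnerA a b 1 then true
    else pvOuterA a (b - 1)
  else false
termination_by b.toNat
decreasing_by omega

def e_hipotenusa_primeira_tentativa (a : Int) : Bool := pvOuterA a (a - 1)

-- ===== PORT B =====
-- B's 'for b in range(1, a)' loop with early return; math.isqrt d (d ≥ 0 here) is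
-- exactly Nat.sqrt on d.toNat
def pvLoopB (a : Int) : List Int → Bool
  | [] => false
  | b :: rest =>
    let d := a * a - b * b
    let r : Int := Int.ofNat (Nat.sqrt d.toNat)
    if r * r = d then true else pvLoopB a rest

def e_hipotenusa_primeira_tentativa_alt (a : Int) : Bool :=
  pvLoopB a (PySem.List.pyRange 1 a 1)

-- ===== PRECONDITION & SPEC =====
def Spec_e_hipotenusa_primeira_tentativa (a : Int) (out : Bool) : Prop := out = e_hipotenusa_primeira_tentativa_alt a
instance (a : Int) (out : Bool) : Decidable (Spec_e_hipotenusa_primeira_tentativa a out) := by unfold Spec_e_hipotenusa_primeira_tentativa; infer_instance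

-- ===== CLAIM (what is proved, stated in full; the proofs are below) =====
def Claim_equal_e_hipotenusa_primeira_tentativa : Prop := ∀ (a : Int), Dom_e_hipotenusa_primeira_tentativa a → Spec_e_hipotenusa_primeira_tentativa a (e_hipotenusa_primeira_tentativa a)

-- ===== LEMMAS AND PROOFS =====

theorem pvInnerA_iff (a b : Int) : ∀ (c : Int),
    pvInnerA a b c = true ↔ ∃ c', c ≤ c' ∧ c' ≤ a - 1 ∧ a ^ 2 = b ^ 2 + c' ^ 2 := by
  intro c
  induction c using pvInnerA.induct a b with
  | case1 c h heq =>
    rw [pvInnerA, if_pos h, if_pos heq]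
    exact ⟨fun _ => ⟨c, le_refl c, h, heq⟩, fun _ => rfl⟩
  | case2 c h heq ih =>
    rw [pvInnerA, if_pos h, if_neg heq, ih]
    constructor
    · rintro ⟨c', h1, h2, h3⟩; exact ⟨c', by omega, h2, h3⟩
    · rintro ⟨c', h1, h2, h3⟩
      refine ⟨c', ?_, h2, h3⟩
      rcases eq_or_lt_of_le h1 with h' | h'
      · exact absurd (h' ▸ h3) heq
      · omega
  | case3 c h =>
    rw [pvInnerA, if_neg h]
    constructor
    · intro hf; exact absurd hf Bool.false_ne_true
    · rintro ⟨c', h1, h2, _⟩; omega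

theorem pvOuterA_iff (a : Int) : ∀ (b : Int),
    pvOuterA a b = true ↔ ∃ b', 1 ≤ b' ∧ b' ≤ b ∧ ∃ c', 1 ≤ c' ∧ c' ≤ a - 1 ∧ a ^ 2 = b' ^ 2 + c' ^ 2 := by
  intro b
  induction b using pvOuterA.induct a with
  | case1 b h hin =>
    rw [pvOuterA, if_pos h, if_pos hin]
    refine ⟨fun _ => ⟨b, h, le_refl b, ?_⟩, fun _ => rfl⟩
    rcases (pvInnerA_iff a b 1).mp hin with ⟨c', h1, h2, h3⟩
    exact ⟨c', h1, h2, h3⟩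
  | case2 b h hin ih =>
    rw [pvOuterA, if_pos h, if_neg hin, ih]
    constructor
    · rintro ⟨b', h1, h2, h3⟩; exact ⟨b', h1, by omega, h3⟩
    · rintro ⟨b', h1, h2, c', hc1, hc2, hc3⟩
      refine ⟨b', h1, ?_, c', hc1, hc2, hc3⟩
      rcases eq_or_lt_of_le h2 with h' | h'
      · exact absurd ((pvInnerA_iff a b 1).mpr ⟨c', hc1, hc2, h' ▸ hc3⟩) hin
      · omega
  | case3 b h =>
    rw [pvOuterA, if_neg h]
    constructor
    · intro hf; exact absurd hf Bool.false_ne_true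
    · rintro ⟨b', h1, h2, _⟩; omega

theorem pvLoopB_iff (a : Int) (l : List Int) :
    pvLoopB a l = true ↔ ∃ b ∈ l,
      (Int.ofNat (Nat.sqrt (a * a - b * b).toNat)) * (Int.ofNat (Nat.sqrt (a * a - b * b).toNat)) = a * a - b * b := by
  induction l with
  | nil => simp [pvLoopB]
  | cons b rest ih =>
    rw [pvLoopB]
    by_cases h : (Int.ofNat (Nat.sqrt (a * a - b * b).toNat)) * (Int.ofNat (Nat.sqrt (a * a - b * b).toNat)) = a * a - b * b
    · rw [if_pos h]
      exact ⟨fun _ => ⟨b, List.mem_cons_self, h⟩, fun _ => rfl⟩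
    · rw [if_neg h, ih]
      constructor
      · rintro ⟨x, hx, hx2⟩; exact ⟨x, List.mem_cons_of_mem _ hx, hx2⟩
      · rintro ⟨x, hx, hx2⟩
        rcases List.mem_cons.mp hx with rfl | hx
        · exact absurd hx2 h
        · exact ⟨x, hx, hx2⟩

-- the perfect-square test at b ∈ [1,a-1] is exactly '∃ c ∈ [1,a-1], a² = b² + c²'
theorem sq_test_iff (a b : Int) (hb1 : 1 ≤ b) (hb2 : b < a) :
    ((Int.ofNat (Nat.sqrt (a * a - b * b).toNat)) * (Int.ofNat (Nat.sqrt (a * a - b * b).toNat)) = a * a - b * b)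
      ↔ ∃ c', 1 ≤ c' ∧ c' ≤ a - 1 ∧ a ^ 2 = b ^ 2 + c' ^ 2 := by
  have hd : (3 : Int) ≤ a * a - b * b := by nlinarith
  constructor
  · intro h
    set r : Int := Int.ofNat (Nat.sqrt (a * a - b * b).toNat) with hr
    have hr0 : 0 ≤ r := Int.natCast_nonneg _
    have hr1 : 1 ≤ r := by nlinarith
    have hrlt : r ≤ a - 1 := by nlinarith
    exact ⟨r, hr1, hrlt, by nlinarith⟩
  · rintro ⟨c, hc1, hc2, hc3⟩
    have hd' : a * a - b * b = c * c := by nlinarith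
    have h0 : (0 : Int) ≤ c := by omega
    have h2 : (a * a - b * b).toNat = c.toNat * c.toNat := by
      have hcc : c * c = ((c.toNat * c.toNat : Nat) : Int) := by
        push_cast; rw [Int.toNat_of_nonneg h0]
      rw [hd', hcc, Int.toNat_natCast]
    have h3 : (Int.ofNat c.toNat) = c := by simpa using Int.toNat_of_nonneg h0
    rw [h2, Nat.sqrt_eq, h3, hd']

-- ===== VERDICT (by name: the statement is the Claim_ definition above) =====
theorem e_hipotenusa_primeira_tentativa_spec : Claim_equal_e_hipotenusa_primeira_tentativa := by
  intro a _
  show e_hipotenusa_primeira_tentativa a = e_hipotenusa_primeira_tentativa_alt a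
  unfold e_hipotenusa_primeira_tentativa e_hipotenusa_primeira_tentativa_alt
  rw [Bool.eq_iff_iff, pvOuterA_iff, pvLoopB_iff]
  constructor
  · rintro ⟨b, h1, h2, hc⟩
    exact ⟨b, PySem.List.mem_pyRange_one.mpr ⟨h1, by omega⟩,
      (sq_test_iff a b h1 (by omega)).mpr hc⟩
  · rintro ⟨b, hb, hsq⟩
    rcases PySem.List.mem_pyRange_one.mp hb with ⟨hb1, hb2⟩
    exact ⟨b, hb1, by omega, (sq_test_iff a b hb1 hb2).mp hsq⟩
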